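-- pv_equiv track=rewrite | github.com/weidongxu-microsoft/misc-automation | sdk_specs_examples.py | get_md_from_java
-- ===== SOURCE A (Python) =====
-- from typing import List, Dict
--
-- def get_md_from_java(lines: List[str], old_class_name: str, new_class_name: str):
--     md_lines = []
--     md_lines.append("```java")
--     skip_head = True
--     for line in lines:
--         if not skip_head:
--             line = line.replace(old_class_name, new_class_name)
--             md_lines.append(line)
--
--         if line.startswith("package"):
--             skip_head = False
--     md_lines.append("```")
--     return "".join(md_lines)
-- ===== SOURCE B (Python) =====
-- def get_md_from_java(lines, old_class_name, new_class_name):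
--     # two-phase: locate the 'package' boundary, then map the tail slice
--     idx = next((i for i, l in enumerate(lines) if l.startswith("package")), len(lines))
--     body = [l.replace(old_class_name, new_class_name) for l in lines[idx + 1:]]
--     return "".join(["```java"] + body + ["```"])
-- ===== Notes on version B (the rewrite author's own statement) =====
-- stated objective: simpler
-- what changed: Replaced the stateful skip_head flag loop with a two-phase decomposition: find the index of the first line starting with 'package', then join '```java', the renamed tail slice, and '```'.
import Mathlib
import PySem

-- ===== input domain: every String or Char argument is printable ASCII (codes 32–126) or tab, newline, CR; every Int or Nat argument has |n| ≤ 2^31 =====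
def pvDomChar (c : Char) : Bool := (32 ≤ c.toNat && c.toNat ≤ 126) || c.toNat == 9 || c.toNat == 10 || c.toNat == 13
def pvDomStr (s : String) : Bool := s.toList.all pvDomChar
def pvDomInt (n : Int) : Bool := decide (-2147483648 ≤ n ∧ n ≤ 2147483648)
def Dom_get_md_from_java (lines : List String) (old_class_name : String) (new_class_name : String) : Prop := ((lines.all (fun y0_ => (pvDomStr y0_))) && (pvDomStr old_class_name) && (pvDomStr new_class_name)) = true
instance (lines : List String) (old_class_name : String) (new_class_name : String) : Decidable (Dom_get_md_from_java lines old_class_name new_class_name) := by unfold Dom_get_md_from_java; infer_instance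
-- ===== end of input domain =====

-- B replaces A's stateful skip_head flag loop with a locate-boundary-then-map-the-tail decomposition (objective: simpler).
-- ===== PORT A =====
-- the for-loop of A: state = (accumulated md_lines, skip_head flag)
def goA (old new : String) : List String → Bool → List String → List String
  | [], _, acc => acc
  | l :: ls, skip, acc =>
    -- 'if not skip_head: line = line.replace(...); md_lines.append(line)'
    let line' := if skip then l else PySem.Str.replace l old new
    let acc' := if skip then acc else acc ++ [line']
    -- 'if line.startswith("package"): skip_head = False'
    goA old new ls (if PySem.Str.startswith line' "package" then false else skip) acc'

def get_md_from_java (lines : List String) (old_class_name : String) (new_class_name : String) : String :=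
  PySem.Str.join "" (goA old_class_name new_class_name lines true ["```java"] ++ ["```"])

-- ===== PORT B =====
-- 'next((i for i, l in enumerate(lines) if l.startswith("package")), len(lines))'
def findPkg : List String → Nat
  | [] => 0
  | l :: ls => if PySem.Str.startswith l "package" then 0 else findPkg ls + 1

def get_md_from_java_alt (lines : List String) (old_class_name : String) (new_class_name : String) : String :=
  let idx := findPkg lines
  let body := (PySem.List.slice lines (some ((idx : Int) + 1)) none).map
    (fun l => PySem.Str.replace l old_class_name new_class_name)
  PySem.Str.join "" (["```java"] ++ body ++ ["```"])

-- ===== PRECONDITION & SPEC =====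
def Spec_get_md_from_java (lines : List String) (old_class_name : String) (new_class_name : String) (out : String) : Prop := out = get_md_from_java_alt lines old_class_name new_class_name
instance (lines : List String) (old_class_name : String) (new_class_name : String) (out : String) : Decidable (Spec_get_md_from_java lines old_class_name new_class_name out) := by unfold Spec_get_md_from_java; infer_instance

-- ===== CLAIM (what is proved, stated in full; the proofs are below) =====
def Claim_equal_get_md_from_java : Prop := ∀ (lines : List String) (old_class_name : String) (new_class_name : String), Dom_get_md_from_java lines old_class_name new_class_name → Spec_get_md_from_java lines old_class_name new_class_name (get_md_from_java lines old_class_name new_class_name)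

-- ===== LEMMAS AND PROOFS =====

-- ===== VERDICT (by name: the statement is the Claim_ definition above) =====
-- once skip_head is False, every remaining line is renamed and appended
theorem goA_false (old new : String) (ls : List String) (acc : List String) :
    goA old new ls false acc = acc ++ ls.map (fun l => PySem.Str.replace l old new) := by
  induction ls generalizing acc with
  | nil => simp [goA]
  | cons l ls ih => simp [goA, ih]

-- the flag loop from skip_head = True appends exactly the renamed tail past the boundary
theorem goA_true (old new : String) (ls : List String) (acc : List String) :
    goA old new ls true acc =
      acc ++ (ls.drop (findPkg ls + 1)).map (fun l => PySem.Str.replace l old new) := by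
  induction ls generalizing acc with
  | nil => simp [goA, findPkg]
  | cons l ls ih =>
    by_cases h : PySem.Chars.startswith l.toList ['p', 'a', 'c', 'k', 'a', 'g', 'e'] = true
    · simp [goA, findPkg, h, goA_false]
    · simp [goA, findPkg, h, ih]

theorem get_md_from_java_spec : Claim_equal_get_md_from_java := by
  intro lines old new _
  show get_md_from_java lines old new = get_md_from_java_alt lines old new
  simp only [get_md_from_java, get_md_from_java_alt]
  rw [goA_true]
  have h1 : ((findPkg lines : Int) + 1) = ((findPkg lines + 1 : Nat) : Int) := by push_cast; ring
  rw [h1, PySem.List.slice_from_natCast]
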